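-- pv_equiv track=rewrite | github.com/LYFTIUM-INC/youtube-mcp-server | src/youtube_mcp_server/models/content_analyzer.py | _classify_scene_type
-- ===== SOURCE A (Python) =====
-- from typing import List, Dict, Tuple, Optional, Any, Union
--
-- def _classify_scene_type(dominant_objects: List[str]) -> str:
--     """Classify scene type based on dominant objects."""
--     # Scene classification rules
--     outdoor_objects = {'tree', 'car', 'truck', 'bus', 'bicycle', 'motorcycle', 'stop sign', 'traffic light'}
--     indoor_objects = {'chair', 'couch', 'bed', 'dining table', 'toilet', 'tv', 'laptop', 'keyboard', 'mouse'}
--     people_objects = {'person'}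
--     animal_objects = {'dog', 'cat', 'bird', 'horse', 'sheep', 'cow', 'elephant', 'bear', 'zebra', 'giraffe'}
--     food_objects = {'banana', 'apple', 'sandwich', 'orange', 'broccoli', 'carrot', 'hot dog', 'pizza', 'donut', 'cake'}
--
--     # Count object categories
--     outdoor_count = sum(1 for obj in dominant_objects if obj in outdoor_objects)
--     indoor_count = sum(1 for obj in dominant_objects if obj in indoor_objects)
--     people_count = sum(1 for obj in dominant_objects if obj in people_objects)
--     animal_count = sum(1 for obj in dominant_objects if obj in animal_objects)
--     food_count = sum(1 for obj in dominant_objects if obj in food_objects)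
--
--     # Classify based on dominant category
--     if people_count > 0:
--         if outdoor_count > indoor_count:
--             return "people_outdoor"
--         elif indoor_count > 0:
--             return "people_indoor"
--         else:
--             return "people"
--     elif animal_count > 0:
--         return "animals"
--     elif food_count > 0:
--         return "food"
--     elif outdoor_count > indoor_count:
--         return "outdoor"
--     elif indoor_count > 0:
--         return "indoor"
--     else:
--         return "general"
-- ===== SOURCE B (Python) =====
-- def _classify_scene_type(dominant_objects):
--     """Classify scene type based on dominant objects."""
--     category_defs = [
--         ('outdoor', ['tree', 'car', 'truck', 'bus', 'bicycle', 'motorcycle', 'stop sign', 'traffic light']),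
--         ('indoor', ['chair', 'couch', 'bed', 'dining table', 'toilet', 'tv', 'laptop', 'keyboard', 'mouse']),
--         ('people', ['person']),
--         ('animal', ['dog', 'cat', 'bird', 'horse', 'sheep', 'cow', 'elephant', 'bear', 'zebra', 'giraffe']),
--         ('food', ['banana', 'apple', 'sandwich', 'orange', 'broccoli', 'carrot', 'hot dog', 'pizza', 'donut', 'cake']),
--     ]
--     # one lookup table: object -> category (the five sets are disjoint)
--     table = {obj: cat for cat, objs in category_defs for obj in objs}
--     # single accumulating pass over the input
--     counts = {}
--     for obj in dominant_objects:
--         cat = table.get(obj)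
--         if cat is not None:
--             counts[cat] = counts.get(cat, 0) + 1
--     outdoor_count = counts.get('outdoor', 0)
--     indoor_count = counts.get('indoor', 0)
--     people_count = counts.get('people', 0)
--     animal_count = counts.get('animal', 0)
--     food_count = counts.get('food', 0)
--
--     if people_count > 0:
--         if outdoor_count > indoor_count:
--             return "people_outdoor"
--         elif indoor_count > 0:
--             return "people_indoor"
--         else:
--             return "people"
--     elif animal_count > 0:
--         return "animals"
--     elif food_count > 0:
--         return "food"
--     elif outdoor_count > indoor_count:
--         return "outdoor"
--     elif indoor_count > 0:
--         return "indoor"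
--     else:
--         return "general"
-- ===== Notes on version B (the rewrite author's own statement) =====
-- stated objective: idiomatic
-- what changed: Replaces A's five separate membership scans over the input with a single precomputed object-to-category lookup table and one accumulating counting pass into a counts dict; the final classification cascade is unchanged.
import Mathlib
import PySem

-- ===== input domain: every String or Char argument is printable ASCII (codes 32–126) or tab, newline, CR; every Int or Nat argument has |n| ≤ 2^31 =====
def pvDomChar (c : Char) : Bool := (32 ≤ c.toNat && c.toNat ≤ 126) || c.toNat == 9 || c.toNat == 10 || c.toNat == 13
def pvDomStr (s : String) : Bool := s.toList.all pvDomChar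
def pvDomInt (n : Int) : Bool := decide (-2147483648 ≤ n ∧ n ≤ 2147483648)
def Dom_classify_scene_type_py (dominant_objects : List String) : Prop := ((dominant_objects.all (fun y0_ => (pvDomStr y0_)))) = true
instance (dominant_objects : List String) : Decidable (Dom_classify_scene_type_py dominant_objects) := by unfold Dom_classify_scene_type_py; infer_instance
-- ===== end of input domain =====

set_option maxRecDepth 10000

-- B replaces A's five repeated membership scans with one precomputed object→category table and a single counting pass (idiomatic; same asymptotic cost).
-- ===== PORT A =====
def outdoorObjects : PySem.Set String := PySem.Set.ofList ["tree", "car", "truck", "bus", "bicycle", "motorcycle", "stop sign", "traffic light"]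
def indoorObjects : PySem.Set String := PySem.Set.ofList ["chair", "couch", "bed", "dining table", "toilet", "tv", "laptop", "keyboard", "mouse"]
def peopleObjects : PySem.Set String := PySem.Set.ofList ["person"]
def animalObjects : PySem.Set String := PySem.Set.ofList ["dog", "cat", "bird", "horse", "sheep", "cow", "elephant", "bear", "zebra", "giraffe"]
def foodObjects : PySem.Set String := PySem.Set.ofList ["banana", "apple", "sandwich", "orange", "broccoli", "carrot", "hot dog", "pizza", "donut", "cake"]

def classify_scene_type_py (dominant_objects : List String) : String :=
  let outdoor_count : Int := (dominant_objects.countP (fun obj => outdoorObjects.contains obj) : Int)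
  let indoor_count : Int := (dominant_objects.countP (fun obj => indoorObjects.contains obj) : Int)
  let people_count : Int := (dominant_objects.countP (fun obj => peopleObjects.contains obj) : Int)
  let animal_count : Int := (dominant_objects.countP (fun obj => animalObjects.contains obj) : Int)
  let food_count : Int := (dominant_objects.countP (fun obj => foodObjects.contains obj) : Int)
  if people_count > 0 then
    if outdoor_count > indoor_count then "people_outdoor"
    else if indoor_count > 0 then "people_indoor"
    else "people"
  else if animal_count > 0 then "animals"
  else if food_count > 0 then "food"
  else if outdoor_count > indoor_count then "outdoor"
  else if indoor_count > 0 then "indoor"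
  else "general"

-- ===== PORT B =====
def pvCategoryDefs : List (String × List String) :=
  [("outdoor", ["tree", "car", "truck", "bus", "bicycle", "motorcycle", "stop sign", "traffic light"]),
   ("indoor", ["chair", "couch", "bed", "dining table", "toilet", "tv", "laptop", "keyboard", "mouse"]),
   ("people", ["person"]),
   ("animal", ["dog", "cat", "bird", "horse", "sheep", "cow", "elephant", "bear", "zebra", "giraffe"]),
   ("food", ["banana", "apple", "sandwich", "orange", "broccoli", "carrot", "hot dog", "pizza", "donut", "cake"])]

-- table = {obj: cat for cat, objs in category_defs for obj in objs}
def pvTable : PySem.Dict String String :=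
  pvCategoryDefs.foldl (fun t p => p.2.foldl (fun t obj => t.insert obj p.1) t) PySem.Dict.empty

def classify_scene_type_py_alt (dominant_objects : List String) : String :=
  let counts : PySem.Dict String Int :=
    dominant_objects.foldl (fun d obj =>
      match pvTable.get? obj with
      | some cat => d.insert cat (d.getD cat 0 + 1)
      | none => d) PySem.Dict.empty
  let outdoor_count : Int := counts.getD "outdoor" 0
  let indoor_count : Int := counts.getD "indoor" 0
  let people_count : Int := counts.getD "people" 0
  let animal_count : Int := counts.getD "animal" 0
  let food_count : Int := counts.getD "food" 0
  if people_count > 0 then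
    if outdoor_count > indoor_count then "people_outdoor"
    else if indoor_count > 0 then "people_indoor"
    else "people"
  else if animal_count > 0 then "animals"
  else if food_count > 0 then "food"
  else if outdoor_count > indoor_count then "outdoor"
  else if indoor_count > 0 then "indoor"
  else "general"

-- ===== PRECONDITION & SPEC =====
def Spec_classify_scene_type_py (dominant_objects : List String) (out : String) : Prop := out = classify_scene_type_py_alt dominant_objects
instance (dominant_objects : List String) (out : String) : Decidable (Spec_classify_scene_type_py dominant_objects out) := by unfold Spec_classify_scene_type_py; infer_instance

-- ===== CLAIM (what is proved, stated in full; the proofs are below) =====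
def Claim_equal_classify_scene_type_py : Prop := ∀ (dominant_objects : List String), Dom_classify_scene_type_py dominant_objects → Spec_classify_scene_type_py dominant_objects (classify_scene_type_py dominant_objects)

-- ===== LEMMAS AND PROOFS =====
lemma get?_mk_nil (obj : String) : (PySem.Dict.mk ([] : List (String × String))).get? obj = none := rfl

lemma pvTable_eq : pvTable = PySem.Dict.mk [("tree", "outdoor"), ("car", "outdoor"), ("truck", "outdoor"), ("bus", "outdoor"), ("bicycle", "outdoor"), ("motorcycle", "outdoor"), ("stop sign", "outdoor"), ("traffic light", "outdoor"), ("chair", "indoor"), ("couch", "indoor"), ("bed", "indoor"), ("dining table", "indoor"), ("toilet", "indoor"), ("tv", "indoor"), ("laptop", "indoor"), ("keyboard", "indoor"), ("mouse", "indoor"), ("person", "people"), ("dog", "animal"), ("cat", "animal"), ("bird", "animal"), ("horse", "animal"), ("sheep", "animal"), ("cow", "animal"), ("elephant", "animal"), ("bear", "animal"), ("zebra", "animal"), ("giraffe", "animal"), ("banana", "food"), ("apple", "food"), ("sandwich", "food"), ("orange", "food"), ("broccoli", "food"), ("carrot", "food"), ("hot dog", "food"), ("pizza", "food"), ("donut",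 "food"), ("cake", "food")] := by decide

lemma lookup_out (obj : String) : (pvTable.get? obj == some "outdoor") = outdoorObjects.contains obj := by
  by_cases h0 : obj = "tree"
  · subst h0; decide
  by_cases h1 : obj = "car"
  · subst h1; decide
  by_cases h2 : obj = "truck"
  · subst h2; decide
  by_cases h3 : obj = "bus"
  · subst h3; decide
  by_cases h4 : obj = "bicycle"
  · subst h4; decide
  by_cases h5 : obj = "motorcycle"
  · subst h5; decide
  by_cases h6 : obj = "stop sign"
  · subst h6; decide
  by_cases h7 : obj = "traffic light"
  · subst h7; decide
  by_cases h8 : obj = "chair"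
  · subst h8; decide
  by_cases h9 : obj = "couch"
  · subst h9; decide
  by_cases h10 : obj = "bed"
  · subst h10; decide
  by_cases h11 : obj = "dining table"
  · subst h11; decide
  by_cases h12 : obj = "toilet"
  · subst h12; decide
  by_cases h13 : obj = "tv"
  · subst h13; decide
  by_cases h14 : obj = "laptop"
  · subst h14; decide
  by_cases h15 : obj = "keyboard"
  · subst h15; decide
  by_cases h16 : obj = "mouse"
  · subst h16; decide
  by_cases h17 : obj = "person"
  · subst h17; decide
  by_cases h18 : obj = "dog"
  · subst h18; decide
  by_cases h19 : obj = "cat"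
  · subst h19; decide
  by_cases h20 : obj = "bird"
  · subst h20; decide
  by_cases h21 : obj = "horse"
  · subst h21; decide
  by_cases h22 : obj = "sheep"
  · subst h22; decide
  by_cases h23 : obj = "cow"
  · subst h23; decide
  by_cases h24 : obj = "elephant"
  · subst h24; decide
  by_cases h25 : obj = "bear"
  · subst h25; decide
  by_cases h26 : obj = "zebra"
  · subst h26; decide
  by_cases h27 : obj = "giraffe"
  · subst h27; decide
  by_cases h28 : obj = "banana"
  · subst h28; decide
  by_cases h29 : obj = "apple"
  · subst h29; decide
  by_cases h30 : obj = "sandwich"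
  · subst h30; decide
  by_cases h31 : obj = "orange"
  · subst h31; decide
  by_cases h32 : obj = "broccoli"
  · subst h32; decide
  by_cases h33 : obj = "carrot"
  · subst h33; decide
  by_cases h34 : obj = "hot dog"
  · subst h34; decide
  by_cases h35 : obj = "pizza"
  · subst h35; decide
  by_cases h36 : obj = "donut"
  · subst h36; decide
  by_cases h37 : obj = "cake"
  · subst h37; decide
  simp [pvTable_eq, PySem.Dict.get?_mk_cons, get?_mk_nil, outdoorObjects, PySem.Set.ofList, h0, Ne.symm h0, h1, Ne.symm h1, h2, Ne.symm h2, h3, Ne.symm h3, h4, Ne.symm h4, h5, Ne.symm h5, h6, Ne.symm h6, h7, Ne.symm h7, h8, Ne.symm h8, h9, Ne.symm h9, h10, Ne.symm h10, h11, Ne.symm h11, h12, Ne.symm h12, h13, Ne.symm h13, h14, Ne.symm h14, h15, Ne.symm h15, h16, Ne.symm h16, h17, Ne.symm h17, h18, Ne.symm h18, h19, Ne.symm h19, h20, Ne.symm h20, h21, Ne.symm h21, h22, Ne.symm h22, h23, Ne.symm h23, h24, Ne.symm h24, h25, Ne.symm h25, h26, Ne.symm h26, h27, Ne.symm h27, h28,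 Ne.symm h28, h29, Ne.symm h29, h30, Ne.symm h30, h31, Ne.symm h31, h32, Ne.symm h32, h33, Ne.symm h33, h34, Ne.symm h34, h35, Ne.symm h35, h36, Ne.symm h36, h37, Ne.symm h37]

lemma lookup_ind (obj : String) : (pvTable.get? obj == some "indoor") = indoorObjects.contains obj := by
  by_cases h0 : obj = "tree"
  · subst h0; decide
  by_cases h1 : obj = "car"
  · subst h1; decide
  by_cases h2 : obj = "truck"
  · subst h2; decide
  by_cases h3 : obj = "bus"
  · subst h3; decide
  by_cases h4 : obj = "bicycle"
  · subst h4; decide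
  by_cases h5 : obj = "motorcycle"
  · subst h5; decide
  by_cases h6 : obj = "stop sign"
  · subst h6; decide
  by_cases h7 : obj = "traffic light"
  · subst h7; decide
  by_cases h8 : obj = "chair"
  · subst h8; decide
  by_cases h9 : obj = "couch"
  · subst h9; decide
  by_cases h10 : obj = "bed"
  · subst h10; decide
  by_cases h11 : obj = "dining table"
  · subst h11; decide
  by_cases h12 : obj = "toilet"
  · subst h12; decide
  by_cases h13 : obj = "tv"
  · subst h13; decide
  by_cases h14 : obj = "laptop"
  · subst h14; decide
  by_cases h15 : obj = "keyboard"
  · subst h15; decide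
  by_cases h16 : obj = "mouse"
  · subst h16; decide
  by_cases h17 : obj = "person"
  · subst h17; decide
  by_cases h18 : obj = "dog"
  · subst h18; decide
  by_cases h19 : obj = "cat"
  · subst h19; decide
  by_cases h20 : obj = "bird"
  · subst h20; decide
  by_cases h21 : obj = "horse"
  · subst h21; decide
  by_cases h22 : obj = "sheep"
  · subst h22; decide
  by_cases h23 : obj = "cow"
  · subst h23; decide
  by_cases h24 : obj = "elephant"
  · subst h24; decide
  by_cases h25 : obj = "bear"
  · subst h25; decide
  by_cases h26 : obj = "zebra"
  · subst h26; decide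
  by_cases h27 : obj = "giraffe"
  · subst h27; decide
  by_cases h28 : obj = "banana"
  · subst h28; decide
  by_cases h29 : obj = "apple"
  · subst h29; decide
  by_cases h30 : obj = "sandwich"
  · subst h30; decide
  by_cases h31 : obj = "orange"
  · subst h31; decide
  by_cases h32 : obj = "broccoli"
  · subst h32; decide
  by_cases h33 : obj = "carrot"
  · subst h33; decide
  by_cases h34 : obj = "hot dog"
  · subst h34; decide
  by_cases h35 : obj = "pizza"
  · subst h35; decide
  by_cases h36 : obj = "donut"
  · subst h36; decide
  by_cases h37 : obj = "cake"
  · subst h37; decide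
  simp [pvTable_eq, PySem.Dict.get?_mk_cons, get?_mk_nil, indoorObjects, PySem.Set.ofList, h0, Ne.symm h0, h1, Ne.symm h1, h2, Ne.symm h2, h3, Ne.symm h3, h4, Ne.symm h4, h5, Ne.symm h5, h6, Ne.symm h6, h7, Ne.symm h7, h8, Ne.symm h8, h9, Ne.symm h9, h10, Ne.symm h10, h11, Ne.symm h11, h12, Ne.symm h12, h13, Ne.symm h13, h14, Ne.symm h14, h15, Ne.symm h15, h16, Ne.symm h16, h17, Ne.symm h17, h18, Ne.symm h18, h19, Ne.symm h19, h20, Ne.symm h20, h21, Ne.symm h21, h22, Ne.symm h22, h23, Ne.symm h23, h24, Ne.symm h24, h25, Ne.symm h25, h26, Ne.symm h26, h27, Ne.symm h27, h28, Ne.symm h28, h29, Ne.symm h29, h30, Ne.symm h30, h31, Ne.symm h31, h32, Ne.symm h32, h33, Ne.symm h33, h34, Ne.symm h34, h35, Ne.symm h35, h36, Ne.symm h36, h37, Ne.symm h37]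

lemma lookup_peo (obj : String) : (pvTable.get? obj == some "people") = peopleObjects.contains obj := by
  by_cases h0 : obj = "tree"
  · subst h0; decide
  by_cases h1 : obj = "car"
  · subst h1; decide
  by_cases h2 : obj = "truck"
  · subst h2; decide
  by_cases h3 : obj = "bus"
  · subst h3; decide
  by_cases h4 : obj = "bicycle"
  · subst h4; decide
  by_cases h5 : obj = "motorcycle"
  · subst h5; decide
  by_cases h6 : obj = "stop sign"
  · subst h6; decide
  by_cases h7 : obj = "traffic light"
  · subst h7; decide
  by_cases h8 : obj = "chair"
  · subst h8; decide
  by_cases h9 : obj = "couch"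
  · subst h9; decide
  by_cases h10 : obj = "bed"
  · subst h10; decide
  by_cases h11 : obj = "dining table"
  · subst h11; decide
  by_cases h12 : obj = "toilet"
  · subst h12; decide
  by_cases h13 : obj = "tv"
  · subst h13; decide
  by_cases h14 : obj = "laptop"
  · subst h14; decide
  by_cases h15 : obj = "keyboard"
  · subst h15; decide
  by_cases h16 : obj = "mouse"
  · subst h16; decide
  by_cases h17 : obj = "person"
  · subst h17; decide
  by_cases h18 : obj = "dog"
  · subst h18; decide
  by_cases h19 : obj = "cat"
  · subst h19; decide
  by_cases h20 : obj = "bird"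
  · subst h20; decide
  by_cases h21 : obj = "horse"
  · subst h21; decide
  by_cases h22 : obj = "sheep"
  · subst h22; decide
  by_cases h23 : obj = "cow"
  · subst h23; decide
  by_cases h24 : obj = "elephant"
  · subst h24; decide
  by_cases h25 : obj = "bear"
  · subst h25; decide
  by_cases h26 : obj = "zebra"
  · subst h26; decide
  by_cases h27 : obj = "giraffe"
  · subst h27; decide
  by_cases h28 : obj = "banana"
  · subst h28; decide
  by_cases h29 : obj = "apple"
  · subst h29; decide
  by_cases h30 : obj = "sandwich"
  · subst h30; decide
  by_cases h31 : obj = "orange"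
  · subst h31; decide
  by_cases h32 : obj = "broccoli"
  · subst h32; decide
  by_cases h33 : obj = "carrot"
  · subst h33; decide
  by_cases h34 : obj = "hot dog"
  · subst h34; decide
  by_cases h35 : obj = "pizza"
  · subst h35; decide
  by_cases h36 : obj = "donut"
  · subst h36; decide
  by_cases h37 : obj = "cake"
  · subst h37; decide
  simp [pvTable_eq, PySem.Dict.get?_mk_cons, get?_mk_nil, peopleObjects, PySem.Set.ofList, h0, Ne.symm h0, h1, Ne.symm h1, h2, Ne.symm h2, h3, Ne.symm h3, h4, Ne.symm h4, h5, Ne.symm h5, h6, Ne.symm h6, h7, Ne.symm h7, h8, Ne.symm h8, h9, Ne.symm h9, h10, Ne.symm h10, h11, Ne.symm h11, h12, Ne.symm h12, h13, Ne.symm h13, h14, Ne.symm h14, h15, Ne.symm h15, h16, Ne.symm h16, h17, Ne.symm h17, h18, Ne.symm h18, h19, Ne.symm h19, h20, Ne.symm h20, h21, Ne.symm h21, h22, Ne.symm h22, h23, Ne.symm h23, h24, Ne.symm h24, h25, Ne.symm h25, h26, Ne.symm h26, h27, Ne.symm h27, h28, Ne.symm h28, h29, Ne.symm h29, h30, Ne.symm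 h30, h31, Ne.symm h31, h32, Ne.symm h32, h33, Ne.symm h33, h34, Ne.symm h34, h35, Ne.symm h35, h36, Ne.symm h36, h37, Ne.symm h37]

lemma lookup_ani (obj : String) : (pvTable.get? obj == some "animal") = animalObjects.contains obj := by
  by_cases h0 : obj = "tree"
  · subst h0; decide
  by_cases h1 : obj = "car"
  · subst h1; decide
  by_cases h2 : obj = "truck"
  · subst h2; decide
  by_cases h3 : obj = "bus"
  · subst h3; decide
  by_cases h4 : obj = "bicycle"
  · subst h4; decide
  by_cases h5 : obj = "motorcycle"
  · subst h5; decide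
  by_cases h6 : obj = "stop sign"
  · subst h6; decide
  by_cases h7 : obj = "traffic light"
  · subst h7; decide
  by_cases h8 : obj = "chair"
  · subst h8; decide
  by_cases h9 : obj = "couch"
  · subst h9; decide
  by_cases h10 : obj = "bed"
  · subst h10; decide
  by_cases h11 : obj = "dining table"
  · subst h11; decide
  by_cases h12 : obj = "toilet"
  · subst h12; decide
  by_cases h13 : obj = "tv"
  · subst h13; decide
  by_cases h14 : obj = "laptop"
  · subst h14; decide
  by_cases h15 : obj = "keyboard"
  · subst h15; decide
  by_cases h16 : obj = "mouse"
  · subst h16; decide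
  by_cases h17 : obj = "person"
  · subst h17; decide
  by_cases h18 : obj = "dog"
  · subst h18; decide
  by_cases h19 : obj = "cat"
  · subst h19; decide
  by_cases h20 : obj = "bird"
  · subst h20; decide
  by_cases h21 : obj = "horse"
  · subst h21; decide
  by_cases h22 : obj = "sheep"
  · subst h22; decide
  by_cases h23 : obj = "cow"
  · subst h23; decide
  by_cases h24 : obj = "elephant"
  · subst h24; decide
  by_cases h25 : obj = "bear"
  · subst h25; decide
  by_cases h26 : obj = "zebra"
  · subst h26; decide
  by_cases h27 : obj = "giraffe"
  · subst h27; decide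
  by_cases h28 : obj = "banana"
  · subst h28; decide
  by_cases h29 : obj = "apple"
  · subst h29; decide
  by_cases h30 : obj = "sandwich"
  · subst h30; decide
  by_cases h31 : obj = "orange"
  · subst h31; decide
  by_cases h32 : obj = "broccoli"
  · subst h32; decide
  by_cases h33 : obj = "carrot"
  · subst h33; decide
  by_cases h34 : obj = "hot dog"
  · subst h34; decide
  by_cases h35 : obj = "pizza"
  · subst h35; decide
  by_cases h36 : obj = "donut"
  · subst h36; decide
  by_cases h37 : obj = "cake"
  · subst h37; decide
  simp [pvTable_eq, PySem.Dict.get?_mk_cons, get?_mk_nil, animalObjects, PySem.Set.ofList, h0, Ne.symm h0, h1, Ne.symm h1, h2, Ne.symm h2, h3, Ne.symm h3, h4, Ne.symm h4, h5, Ne.symm h5, h6, Ne.symm h6, h7, Ne.symm h7, h8, Ne.symm h8, h9, Ne.symm h9, h10, Ne.symm h10, h11, Ne.symm h11, h12, Ne.symm h12, h13, Ne.symm h13, h14, Ne.symm h14, h15, Ne.symm h15, h16, Ne.symm h16, h17, Ne.symm h17, h18, Ne.symm h18, h19, Ne.symm h19, h20, Ne.symm h20, h21, Ne.symm h21, h22,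 Ne.symm h22, h23, Ne.symm h23, h24, Ne.symm h24, h25, Ne.symm h25, h26, Ne.symm h26, h27, Ne.symm h27, h28, Ne.symm h28, h29, Ne.symm h29, h30, Ne.symm h30, h31, Ne.symm h31, h32, Ne.symm h32, h33, Ne.symm h33, h34, Ne.symm h34, h35, Ne.symm h35, h36, Ne.symm h36, h37, Ne.symm h37]

lemma lookup_foo (obj : String) : (pvTable.get? obj == some "food") = foodObjects.contains obj := by
  by_cases h0 : obj = "tree"
  · subst h0; decide
  by_cases h1 : obj = "car"
  · subst h1; decide
  by_cases h2 : obj = "truck"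
  · subst h2; decide
  by_cases h3 : obj = "bus"
  · subst h3; decide
  by_cases h4 : obj = "bicycle"
  · subst h4; decide
  by_cases h5 : obj = "motorcycle"
  · subst h5; decide
  by_cases h6 : obj = "stop sign"
  · subst h6; decide
  by_cases h7 : obj = "traffic light"
  · subst h7; decide
  by_cases h8 : obj = "chair"
  · subst h8; decide
  by_cases h9 : obj = "couch"
  · subst h9; decide
  by_cases h10 : obj = "bed"
  · subst h10; decide
  by_cases h11 : obj = "dining table"
  · subst h11; decide
  by_cases h12 : obj = "toilet"
  · subst h12; decide
  by_cases h13 : obj = "tv"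
  · subst h13; decide
  by_cases h14 : obj = "laptop"
  · subst h14; decide
  by_cases h15 : obj = "keyboard"
  · subst h15; decide
  by_cases h16 : obj = "mouse"
  · subst h16; decide
  by_cases h17 : obj = "person"
  · subst h17; decide
  by_cases h18 : obj = "dog"
  · subst h18; decide
  by_cases h19 : obj = "cat"
  · subst h19; decide
  by_cases h20 : obj = "bird"
  · subst h20; decide
  by_cases h21 : obj = "horse"
  · subst h21; decide
  by_cases h22 : obj = "sheep"
  · subst h22; decide
  by_cases h23 : obj = "cow"
  · subst h23; decide
  by_cases h24 : obj = "elephant"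
  · subst h24; decide
  by_cases h25 : obj = "bear"
  · subst h25; decide
  by_cases h26 : obj = "zebra"
  · subst h26; decide
  by_cases h27 : obj = "giraffe"
  · subst h27; decide
  by_cases h28 : obj = "banana"
  · subst h28; decide
  by_cases h29 : obj = "apple"
  · subst h29; decide
  by_cases h30 : obj = "sandwich"
  · subst h30; decide
  by_cases h31 : obj = "orange"
  · subst h31; decide
  by_cases h32 : obj = "broccoli"
  · subst h32; decide
  by_cases h33 : obj = "carrot"
  · subst h33; decide
  by_cases h34 : obj = "hot dog"
  · subst h34; decide
  by_cases h35 : obj = "pizza"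
  · subst h35; decide
  by_cases h36 : obj = "donut"
  · subst h36; decide
  by_cases h37 : obj = "cake"
  · subst h37; decide
  simp [pvTable_eq, PySem.Dict.get?_mk_cons, get?_mk_nil, foodObjects, PySem.Set.ofList, h0, Ne.symm h0, h1, Ne.symm h1, h2, Ne.symm h2, h3, Ne.symm h3, h4, Ne.symm h4, h5, Ne.symm h5, h6, Ne.symm h6, h7, Ne.symm h7, h8, Ne.symm h8, h9, Ne.symm h9, h10, Ne.symm h10, h11, Ne.symm h11, h12, Ne.symm h12, h13, Ne.symm h13, h14, Ne.symm h14, h15, Ne.symm h15, h16, Ne.symm h16, h17, Ne.symm h17, h18, Ne.symm h18, h19, Ne.symm h19, h20, Ne.symm h20, h21, Ne.symm h21, h22, Ne.symm h22, h23, Ne.symm h23, h24, Ne.symm h24, h25, Ne.symm h25, h26, Ne.symm h26, h27, Ne.symm h27, h28, Ne.symm h28, h29, Ne.symm h29, h30, Ne.symm h30, h31, Ne.symm h31, h32, Ne.symm h32, h33, Ne.symm h33, h34, Ne.symm h34, h35, Ne.symm h35, h36, Ne.symm h36, h37, Ne.symm h37]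

lemma counts_getD (c : String) : ∀ (l : List String) (d : PySem.Dict String Int),
    (l.foldl (fun d obj =>
      match pvTable.get? obj with
      | some cat => d.insert cat (d.getD cat 0 + 1)
      | none => d) d).getD c 0
      = d.getD c 0 + (l.countP (fun o => pvTable.get? o == some c) : Int)
  | [], d => by simp
  | obj :: l, d => by
    rw [List.foldl_cons, List.countP_cons]
    cases h : pvTable.get? obj with
    | none => simp [h, counts_getD c l d]
    | some cat =>
      rw [counts_getD c l _]
      by_cases hc : c = cat
      · subst hc; simp [h, PySem.Dict.getD_insert_self]; ring
      · simp [h, PySem.Dict.getD_insert, hc, Ne.symm hc]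

-- ===== VERDICT (by name: the statement is the Claim_ definition above) =====
theorem classify_scene_type_py_spec : Claim_equal_classify_scene_type_py := by
  intro l _
  unfold Spec_classify_scene_type_py classify_scene_type_py classify_scene_type_py_alt
  simp only [counts_getD, PySem.Dict.getD_empty, zero_add,
    lookup_out, lookup_ind, lookup_peo, lookup_ani, lookup_foo]
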